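-- pv_equiv track=rewrite | github.com/ZJU-PL/aria | aria/translator/qcir2smt.py | _reference_expression
-- ===== SOURCE A (Python) =====
-- from typing import Dict, Iterable, List, Optional, Set
--
-- def _xor_expression(parts: List[str]) -> str:
--     if not parts:
--         return "false"
--     if len(parts) == 1:
--         return parts[0]
--     if len(parts) == 2:
--         return f"(xor {parts[0]} {parts[1]})"
--     parity = parts[0]
--     for part in parts[1:]:
--         parity = f"(xor {parity} {part})"
--     return parity
--
-- def _gate_expression(
--     gate_id: int,
--     gate_map: Dict[int, tuple],
--     cache: Dict[int, str],
--     visiting: Optional[Set[int]] = None,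
-- ) -> str:
--     if gate_id in cache:
--         return cache[gate_id]
--     if visiting is None:
--         visiting = set()
--     if gate_id in visiting:
--         raise ValueError("QCIR gate graph must be acyclic")
--     if gate_id not in gate_map:
--         raise ValueError(f"undefined QCIR gate reference: {gate_id}")
--
--     visiting.add(gate_id)
--     gate_type, refs = gate_map[gate_id]
--     parts = [_reference_expression(ref, gate_map, cache, visiting) for ref in refs]
--
--     if gate_type == "and":
--         expr = "true" if not parts else f"(and {' '.join(parts)})"
--     elif gate_type == "or":
--         expr = "false" if not parts else f"(or {' '.join(parts)})"
--     elif gate_type == "xor":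
--         expr = _xor_expression(parts)
--     elif gate_type == "ite":
--         if len(parts) != 3:
--             raise ValueError("QCIR ite gate requires exactly three operands")
--         expr = f"(ite {parts[0]} {parts[1]} {parts[2]})"
--     else:
--         raise ValueError(f"unsupported QCIR gate type: {gate_type}")
--
--     visiting.remove(gate_id)
--     cache[gate_id] = expr
--     return expr
--
-- def _reference_expression(
--     ref: int,
--     gate_map: Dict[int, tuple],
--     cache: Dict[int, str],
--     visiting: Optional[Set[int]] = None,
-- ) -> str:
--     ref_value = int(ref)
--     if ref_value < 0:
--         return f"(not {_reference_expression(-ref_value, gate_map, cache, visiting)})"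
--     if ref_value in gate_map:
--         return _gate_expression(ref_value, gate_map, cache, visiting)
--     return f"q{ref_value}"
-- ===== SOURCE B (Python) =====
-- # B: non-recursive round-based fixpoint evaluation. A table seeded from the cache
-- # is grown by repeated passes over the gate map: each pass evaluates every gate
-- # whose operands are already available; after len(gate_map)+1 passes every
-- # evaluable gate is filled, whatever order the gates are listed in. The final
-- # lookup raises ValueError if the requested gate could not be evaluated.
-- # Return-value equivalence only: unlike A, B does not mutate the caller's
-- # cache/visiting.
-- def _reference_expression(ref, gate_map, cache, visiting=None):
--     table = dict(cache)
--     for _ in range(len(gate_map) + 1):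
--         for gid, (gtype, refs) in gate_map.items():
--             if gid in table:
--                 continue
--             if gtype not in ("and", "or", "xor", "ite") or (gtype == "ite" and len(refs) != 3):
--                 continue
--             parts = [_resolve(gate_map, table, r) for r in refs]
--             if None in parts:
--                 continue
--             table[gid] = _smt_node(gtype, parts)
--     result = _resolve(gate_map, table, int(ref))
--     if result is None:
--         raise ValueError("unevaluable QCIR gate reference")
--     return result
--
-- def _resolve(gate_map, table, r):
--     if r < 0:
--         s = _resolve(gate_map, table, -r)
--         return None if s is None else f"(not {s})"
--     if r in gate_map:
--         return table.get(r)
--     return f"q{r}"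
--
-- def _smt_node(gtype, parts):
--     if gtype == "and":
--         return f"(and {' '.join(parts)})" if parts else "true"
--     if gtype == "or":
--         return f"(or {' '.join(parts)})" if parts else "false"
--     if gtype == "xor":
--         if not parts:
--             return "false"
--         acc = parts[0]
--         for p in parts[1:]:
--             acc = f"(xor {acc} {p})"
--         return acc
--     # gtype == "ite" with exactly three operands (caller checked)
--     return f"(ite {parts[0]} {parts[1]} {parts[2]})"
-- ===== Notes on version B (the rewrite author's own statement) =====
-- stated objective: alternative
-- what changed: A's memoized recursive DFS (threaded cache, visiting set for cycle detection) is replaced by a non-recursive round-based fixpoint: len(gate_map)+1 passes over the gate map fill one table seeded from the cache, each pass evaluating every gate whose operands are already available, in whatever order the gates are listed; the reference is then resolved by a plain table lookup.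
import Mathlib
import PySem

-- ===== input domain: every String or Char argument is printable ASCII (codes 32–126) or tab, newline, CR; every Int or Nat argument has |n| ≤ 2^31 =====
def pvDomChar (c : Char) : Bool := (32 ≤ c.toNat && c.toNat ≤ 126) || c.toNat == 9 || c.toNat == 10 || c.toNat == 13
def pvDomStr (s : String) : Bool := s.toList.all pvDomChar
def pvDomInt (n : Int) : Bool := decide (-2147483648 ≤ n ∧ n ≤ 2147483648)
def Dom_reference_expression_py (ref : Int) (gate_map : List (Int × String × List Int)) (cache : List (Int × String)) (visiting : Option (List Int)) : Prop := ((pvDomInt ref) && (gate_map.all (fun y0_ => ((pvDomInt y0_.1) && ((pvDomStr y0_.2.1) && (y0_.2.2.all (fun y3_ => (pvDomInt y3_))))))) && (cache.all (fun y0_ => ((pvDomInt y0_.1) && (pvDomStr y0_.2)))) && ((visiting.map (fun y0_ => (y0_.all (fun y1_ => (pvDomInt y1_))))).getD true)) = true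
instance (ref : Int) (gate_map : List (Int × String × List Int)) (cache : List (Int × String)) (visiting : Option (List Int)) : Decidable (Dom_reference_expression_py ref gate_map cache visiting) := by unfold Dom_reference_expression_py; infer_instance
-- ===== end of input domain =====

-- B replaces A's memoized recursive DFS by a non-recursive round-based fixpoint: repeated
-- passes over the gate map fill one table, each pass evaluating every gate whose operands are
-- already available, in whatever order the gates are listed.  Return-value equivalence only:
-- A mutates the caller's cache/visiting in place, B does not.

-- ===== PORT A =====
-- _xor_expression
def pyXorExprA : List String → String
  | [] => "false"
  | [p] => p
  | [p, q] => "(xor " ++ p ++ " " ++ q ++ ")"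
  | p :: rest => rest.foldl (fun parity part => "(xor " ++ parity ++ " " ++ part ++ ")") p

-- _reference_expression / _gate_expression; fuel makes the (possibly cyclic) recursion total,
-- the `""` results stand where the Python raises ValueError (excluded by Pre_).
mutual
def pyRefExprA (fuel : Nat) (ref : Int) (gm : PySem.Dict Int (String × List Int))
    (cache : PySem.Dict Int String) (visiting : PySem.Set Int) :
    String × PySem.Dict Int String :=
  match fuel with
  | 0 => ("", cache)
  | f + 1 =>
    if ref < 0 then
      let p := pyRefExprA f (-ref) gm cache visiting
      ("(not " ++ p.1 ++ ")", p.2)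
    else if gm.contains ref then pyGateExprA f ref gm cache visiting
    else ("q" ++ PySem.Int.toStr ref, cache)
  termination_by (fuel, 0)

def pyGateExprA (fuel : Nat) (gid : Int) (gm : PySem.Dict Int (String × List Int))
    (cache : PySem.Dict Int String) (visiting : PySem.Set Int) :
    String × PySem.Dict Int String :=
  match cache.get? gid with
  | some s => (s, cache)
  | none =>
    if PySem.Set.contains visiting gid then ("", cache)       -- raise: graph must be acyclic
    else
      match gm.get? gid with
      | none => ("", cache)                                   -- raise: undefined gate reference
      | some tyrefs =>
        let vis' := PySem.Set.add visiting gid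
        let st := tyrefs.2.foldl
          (fun (acc : List String × PySem.Dict Int String) r =>
            let p := pyRefExprA fuel r gm acc.2 vis'
            (acc.1 ++ [p.1], p.2)) ([], cache)
        let expr :=
          if tyrefs.1 = "and" then
            (if st.1.isEmpty then "true" else "(and " ++ PySem.Str.join " " st.1 ++ ")")
          else if tyrefs.1 = "or" then
            (if st.1.isEmpty then "false" else "(or " ++ PySem.Str.join " " st.1 ++ ")")
          else if tyrefs.1 = "xor" then pyXorExprA st.1
          else if tyrefs.1 = "ite" then
            (if st.1.length = 3 then
              "(ite " ++ st.1[0]! ++ " " ++ st.1[1]! ++ " " ++ st.1[2]! ++ ")"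
            else "")                                          -- raise: ite needs three operands
          else ""                                             -- raise: unsupported gate type
        (expr, st.2.insert gid expr)
  termination_by (fuel, 1)
end

def reference_expression_py (ref : Int) (gate_map : List (Int × String × List Int)) (cache : List (Int × String)) (visiting : Option (List Int)) : String :=
  (pyRefExprA (2 * gate_map.length + 4) ref (PySem.Dict.mk gate_map) (PySem.Dict.mk cache)
      (visiting.getD [])).1

-- ===== PORT B =====
-- _resolve (none = the child is not (yet) evaluable)
def pyResolveB (gm : PySem.Dict Int (String × List Int)) (table : PySem.Dict Int String)
    (r : Int) : Option String :=
  if r < 0 then (pyResolveB gm table (-r)).map (fun s => "(not " ++ s ++ ")")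
  else if gm.contains r then table.get? r
  else some ("q" ++ PySem.Int.toStr r)
  termination_by (if r < 0 then 1 else 0)
  decreasing_by simp_all; omega

-- _smt_node (the caller has already checked the gate type and the ite arity)
def pySmtNodeB (gty : String) (parts : List String) : String :=
  if gty = "and" then (if parts.isEmpty then "true" else "(and " ++ PySem.Str.join " " parts ++ ")")
  else if gty = "or" then (if parts.isEmpty then "false" else "(or " ++ PySem.Str.join " " parts ++ ")")
  else if gty = "xor" then
    match parts with
    | [] => "false"
    | p :: rest => rest.foldl (fun acc q => "(xor " ++ acc ++ " " ++ q ++ ")") p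
  else "(ite " ++ parts[0]! ++ " " ++ parts[1]! ++ " " ++ parts[2]! ++ ")"

-- the `for _ in range(len(gate_map)+1): for gid, (gtype, refs) in gate_map.items()` loops of B
def pyBuildTableB (gm : PySem.Dict Int (String × List Int))
    (entries : List (Int × String × List Int)) (rounds : Nat) (table : PySem.Dict Int String) :
    PySem.Dict Int String :=
  (List.range rounds).foldl (fun tbl _ =>
    entries.foldl (fun t e =>
      if t.contains e.1 then t
      else if ¬ (e.2.1 = "and" ∨ e.2.1 = "or" ∨ e.2.1 = "xor" ∨ e.2.1 = "ite")
          ∨ (e.2.1 = "ite" ∧ e.2.2.length ≠ 3) then t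
      else if none ∈ e.2.2.map (pyResolveB gm t) then t
      else t.insert e.1
        (pySmtNodeB e.2.1 ((e.2.2.map (pyResolveB gm t)).map (fun o => o.getD "")))) tbl) table

def reference_expression_py_alt (ref : Int) (gate_map : List (Int × String × List Int)) (cache : List (Int × String)) (visiting : Option (List Int)) : String :=
  let gm := PySem.Dict.mk gate_map
  -- `.getD ""` stands where Source B raises ValueError on an unevaluable reference (outside Pre_)
  (pyResolveB gm (pyBuildTableB gm gate_map (gate_map.length + 1) (PySem.Dict.mk cache)) ref).getD ""

-- ===== PRECONDITION & SPEC =====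
def pvAbsRef (r : Int) : Int := if r < 0 then -r else r

def pvCK (cache : List (Int × String)) : List Int := cache.map (·.1)

-- gate keys a gate expands to: its children's keys, unless the gate is pre-cached
def pvChildExp (K : List (Int × String × List Int)) (cache : List (Int × String))
    (g : Int) : List Int :=
  if (pvCK cache).contains g then []
  else
    match (PySem.Dict.mk K : PySem.Dict Int (String × List Int)).get? g with
    | some tr => (tr.2.map pvAbsRef).filter (fun a => (K.map (·.1)).contains a)
    | none => []

def pvReachStep (K : List (Int × String × List Int)) (cache : List (Int × String))
    (R : List Int) : List Int :=
  (R ++ R.flatMap (pvChildExp K cache)).dedup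

-- the gate keys A's DFS from `ref` visits (expansion stops at pre-cached gates)
def pvReach (ref : Int) (K : List (Int × String × List Int)) (cache : List (Int × String)) :
    List Int :=
  (pvReachStep K cache)^[K.length + 1] [pvAbsRef ref]

-- gates evaluable in one more round: every child that is an uncached gate is already done
def pvDoneStep (K : List (Int × String × List Int)) (ck : List Int) (D : List Int) : List Int :=
  (K.filter (fun e => e.2.2.all (fun r =>
      !(K.map (·.1)).contains (pvAbsRef r) || ck.contains (pvAbsRef r) ||
        D.contains (pvAbsRef r)))).map (·.1)

-- gates whose dependency cone (stopping at cached gates) is acyclic of height < k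
def pvDone (K : List (Int × String × List Int)) (ck : List Int) : Nat → List Int
  | 0 => []
  | k + 1 => pvDoneStep K ck (pvDone K ck k)

-- Pre_ covers exactly the inputs on which A's DFS from `ref` returns normally: every gate the
-- DFS visits (pvReach) is of a supported type with the right arity, has an acyclic dependency
-- cone (membership in pvDone), and is not in the caller-supplied `visiting` set; on the
-- excluded inputs A raises ValueError.  The two Nodup conjuncts only rule out association
-- lists with duplicate keys, which no real Python dict produces; the fixpoint conjunct always
-- holds and just records that pvReach has converged.
def Pre_reference_expression_py (ref : Int) (gate_map : List (Int × String × List Int)) (cache : List (Int × String)) (visiting : Option (List Int)) : Prop :=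
  (gate_map.map (·.1)).Nodup ∧ (cache.map (·.1)).Nodup ∧
  pvReachStep gate_map cache (pvReach ref gate_map cache) = pvReach ref gate_map cache ∧
  (∀ e ∈ gate_map, e.1 ∈ pvReach ref gate_map cache → e.1 ∉ pvCK cache →
      e.1 ∈ pvDone gate_map (pvCK cache) gate_map.length) ∧
  (∀ e ∈ gate_map, e.1 ∈ pvReach ref gate_map cache → e.1 ∉ pvCK cache →
      e.2.1 = "and" ∨ e.2.1 = "or" ∨ e.2.1 = "xor" ∨ (e.2.1 = "ite" ∧ e.2.2.length = 3)) ∧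
  (∀ e ∈ gate_map, e.1 ∈ pvReach ref gate_map cache → e.1 ∉ pvCK cache →
      e.1 ∉ visiting.getD [])
instance (ref : Int) (gate_map : List (Int × String × List Int)) (cache : List (Int × String)) (visiting : Option (List Int)) : Decidable (Pre_reference_expression_py ref gate_map cache visiting) := by unfold Pre_reference_expression_py; infer_instance

def pvWitness_reference_expression_py : Int × (List (Int × String × List Int)) × (List (Int × String)) × Option (List Int) :=
  (-3, [(1, ("and", [2, -7])), (3, ("xor", [1, 1, 7]))], [(9, "x")], some [99])

def Spec_reference_expression_py (ref : Int) (gate_map : List (Int × String × List Int)) (cache : List (Int × String)) (visiting : Option (List Int)) (out : String) : Prop := out = reference_expression_py_alt ref gate_map cache visiting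
instance (ref : Int) (gate_map : List (Int × String × List Int)) (cache : List (Int × String)) (visiting : Option (List Int)) (out : String) : Decidable (Spec_reference_expression_py ref gate_map cache visiting out) := by unfold Spec_reference_expression_py; infer_instance

-- ===== CLAIM (what is proved, stated in full; the proofs are below) =====
def Claim_equal_reference_expression_py : Prop := ∀ (ref : Int) (gate_map : List (Int × String × List Int)) (cache : List (Int × String)) (visiting : Option (List Int)), Dom_reference_expression_py ref gate_map cache visiting → Pre_reference_expression_py ref gate_map cache visiting → Spec_reference_expression_py ref gate_map cache visiting (reference_expression_py ref gate_map cache visiting)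

-- ===== LEMMAS AND PROOFS =====

def pvKeys (K : List (Int × String × List Int)) : List Int := K.map (·.1)

def pvStep (gm : PySem.Dict Int (String × List Int)) (t : PySem.Dict Int String)
    (e : Int × String × List Int) : PySem.Dict Int String :=
  if t.contains e.1 then t
  else if ¬ (e.2.1 = "and" ∨ e.2.1 = "or" ∨ e.2.1 = "xor" ∨ e.2.1 = "ite")
      ∨ (e.2.1 = "ite" ∧ e.2.2.length ≠ 3) then t
  else if none ∈ e.2.2.map (pyResolveB gm t) then t
  else t.insert e.1
    (pySmtNodeB e.2.1 ((e.2.2.map (pyResolveB gm t)).map (fun o => o.getD "")))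

def pvRound (gm : PySem.Dict Int (String × List Int))
    (K : List (Int × String × List Int)) (t : PySem.Dict Int String) :
    PySem.Dict Int String :=
  K.foldl (pvStep gm) t

def pvRounds (gm : PySem.Dict Int (String × List Int))
    (K : List (Int × String × List Int)) : Nat → PySem.Dict Int String → PySem.Dict Int String
  | 0, t => t
  | m + 1, t => pvRounds gm K m (pvRound gm K t)

lemma pvFoldConst (gm : PySem.Dict Int (String × List Int))
    (K : List (Int × String × List Int)) (l : List Nat) (t : PySem.Dict Int String) :
    l.foldl (fun tbl _ => pvRound gm K tbl) t = pvRounds gm K l.length t := by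
  induction l generalizing t with
  | nil => rfl
  | cons x xs ih => simp [List.foldl_cons, ih, pvRounds]

lemma pvBuild_eq (gm : PySem.Dict Int (String × List Int))
    (K : List (Int × String × List Int)) (m : Nat) (t : PySem.Dict Int String) :
    pyBuildTableB gm K m t = pvRounds gm K m t := by
  show (List.range m).foldl (fun tbl _ => K.foldl (pvStep gm) tbl) t = _
  have := pvFoldConst gm K (List.range m) t
  simpa [pvRound] using this

def pvT (K : List (Int × String × List Int)) (cache : List (Int × String)) :
    PySem.Dict Int String :=
  pvRounds (PySem.Dict.mk K) K (K.length + 1) (PySem.Dict.mk cache)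

def pvDictLe (c d : PySem.Dict Int String) : Prop :=
  ∀ k v, c.get? k = some v → d.get? k = some v

lemma pvDictLe_trans {a b c : PySem.Dict Int String} (h1 : pvDictLe a b) (h2 : pvDictLe b c) :
    pvDictLe a c := fun k v h => h2 k v (h1 k v h)

def pvGood (K : List (Int × String × List Int)) (cache : List (Int × String))
    (c : PySem.Dict Int String) : Prop :=
  pvDictLe (PySem.Dict.mk cache) c ∧
  ∀ g v, c.get? g = some v → (pvT K cache).get? g = some v

lemma pvDictContains_iff (K : List (Int × String × List Int)) (x : Int) :
    (PySem.Dict.mk K : PySem.Dict Int (String × List Int)).contains x = true ↔ x ∈ pvKeys K := by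
  rw [PySem.Dict.contains_eq_decide_mem_keys]
  simp only [decide_eq_true_eq]
  exact Iff.rfl

lemma pvStep_mono (gm : PySem.Dict Int (String × List Int)) (t : PySem.Dict Int String)
    (e : Int × String × List Int) : pvDictLe t (pvStep gm t e) := by
  intro k v h
  unfold pvStep
  split
  · exact h
  · split
    · exact h
    · split
      · exact h
      · rename_i hcon _ _
        rw [PySem.Dict.get?_insert]
        split
        · rename_i hk
          subst hk
          rw [PySem.Dict.contains_eq_isSome_get?, h] at hcon
          simp at hcon
        · exact h

lemma pvStep_insert (gm : PySem.Dict Int (String × List Int)) (t : PySem.Dict Int String)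
    (e : Int × String × List Int) (h1 : t.contains e.1 = false)
    (h2 : ¬ (¬ (e.2.1 = "and" ∨ e.2.1 = "or" ∨ e.2.1 = "xor" ∨ e.2.1 = "ite")
        ∨ (e.2.1 = "ite" ∧ e.2.2.length ≠ 3)))
    (h3 : ¬ (none ∈ e.2.2.map (pyResolveB gm t))) :
    pvStep gm t e = t.insert e.1
      (pySmtNodeB e.2.1 ((e.2.2.map (pyResolveB gm t)).map (fun o => o.getD ""))) := by
  unfold pvStep
  rw [h1]
  simp only [Bool.false_eq_true, if_false]
  rw [if_neg h2, if_neg h3]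

lemma pvFold_mono (gm : PySem.Dict Int (String × List Int))
    (entries : List (Int × String × List Int)) (t : PySem.Dict Int String) :
    pvDictLe t (entries.foldl (pvStep gm) t) := by
  induction entries generalizing t with
  | nil => intro k v h; simpa using h
  | cons e es ih =>
    intro k v h
    exact ih (pvStep gm t e) k v (pvStep_mono gm t e k v h)

lemma pvRound_mono (gm : PySem.Dict Int (String × List Int))
    (K : List (Int × String × List Int)) (t : PySem.Dict Int String) :
    pvDictLe t (pvRound gm K t) := pvFold_mono gm K t

lemma pvRounds_le (gm : PySem.Dict Int (String × List Int))
    (K : List (Int × String × List Int)) (m : Nat) (t : PySem.Dict Int String) :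
    pvDictLe t (pvRounds gm K m t) := by
  induction m generalizing t with
  | zero => intro k v h; simpa [pvRounds] using h
  | succ n ih =>
    exact pvDictLe_trans (pvRound_mono gm K t) (ih (pvRound gm K t))

lemma pvRounds_succ_end (gm : PySem.Dict Int (String × List Int))
    (K : List (Int × String × List Int)) (m : Nat) (t : PySem.Dict Int String) :
    pvRounds gm K (m + 1) t = pvRound gm K (pvRounds gm K m t) := by
  induction m generalizing t with
  | zero => rfl
  | succ n ih =>
    show pvRounds gm K (n + 1) (pvRound gm K t) = _
    rw [ih (pvRound gm K t)]
    rfl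

lemma pvRounds_mono (gm : PySem.Dict Int (String × List Int))
    (K : List (Int × String × List Int)) (m m' : Nat) (h : m ≤ m') (t : PySem.Dict Int String) :
    pvDictLe (pvRounds gm K m t) (pvRounds gm K m' t) := by
  induction m' with
  | zero =>
    have : m = 0 := by omega
    subst this
    intro k v hv; exact hv
  | succ n ih =>
    rcases Nat.lt_or_ge m (n+1) with hlt | hge
    · have h1 := ih (by omega)
      rw [pvRounds_succ_end]
      exact pvDictLe_trans h1 (pvRound_mono gm K _)
    · have : m = n + 1 := by omega
      subst this
      intro k v hv; exact hv

lemma pvResolveB_congr (gm : PySem.Dict Int (String × List Int))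
    (t T : PySem.Dict Int String) (hmono : pvDictLe t T) (r : Int)
    (hsome : gm.contains (pvAbsRef r) = true → (t.get? (pvAbsRef r)).isSome) :
    pyResolveB gm t r = pyResolveB gm T r := by
  have aux : ∀ s : Int, ¬ s < 0 → (gm.contains s = true → (t.get? s).isSome) →
      pyResolveB gm t s = pyResolveB gm T s := by
    intro s hs hsome'
    rw [pyResolveB]
    conv_rhs => rw [pyResolveB]
    simp only [if_neg hs]
    by_cases hcon : gm.contains s = true
    · simp only [hcon, if_true]
      obtain ⟨v, hv⟩ := Option.isSome_iff_exists.mp (hsome' hcon)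
      rw [hv, hmono s v hv]
    · simp only [Bool.not_eq_true] at hcon
      simp [hcon]
  by_cases hlt : r < 0
  · have habs : pvAbsRef r = -r := by unfold pvAbsRef; simp [hlt]
    have h2 := aux (-r) (by omega) (by rw [← habs]; exact hsome)
    rw [pyResolveB]
    conv_rhs => rw [pyResolveB]
    simp only [if_pos hlt]
    rw [h2]
  · have habs : pvAbsRef r = r := by unfold pvAbsRef; simp [hlt]
    exact aux r hlt (by rw [← habs]; exact hsome)

lemma pvResolveB_isSome (gm : PySem.Dict Int (String × List Int))
    (t : PySem.Dict Int String) (r : Int)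
    (hsome : gm.contains (pvAbsRef r) = true → (t.get? (pvAbsRef r)).isSome) :
    (pyResolveB gm t r).isSome := by
  have aux : ∀ s : Int, ¬ s < 0 → (gm.contains s = true → (t.get? s).isSome) →
      (pyResolveB gm t s).isSome := by
    intro s hs hsome'
    rw [pyResolveB]
    simp only [if_neg hs]
    by_cases hcon : gm.contains s = true
    · simpa [hcon] using hsome' hcon
    · simp only [Bool.not_eq_true] at hcon
      simp [hcon]
  by_cases hlt : r < 0
  · have habs : pvAbsRef r = -r := by unfold pvAbsRef; simp [hlt]
    have h2 := aux (-r) (by omega) (by rw [← habs]; exact hsome)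
    rw [pyResolveB]
    simp only [if_pos hlt]
    simpa using h2
  · have habs : pvAbsRef r = r := by unfold pvAbsRef; simp [hlt]
    exact aux r hlt (by rw [← habs]; exact hsome)

lemma pvResolveB_isSome_inv (gm : PySem.Dict Int (String × List Int))
    (t : PySem.Dict Int String) (r : Int) (h : (pyResolveB gm t r).isSome) :
    gm.contains (pvAbsRef r) = true → (t.get? (pvAbsRef r)).isSome := by
  intro hcon
  have aux : ∀ s : Int, ¬ s < 0 → (pyResolveB gm t s).isSome → gm.contains s = true →
      (t.get? s).isSome := by
    intro s hs hsm hc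
    rw [pyResolveB] at hsm
    simp only [if_neg hs, hc, if_true] at hsm
    exact hsm
  by_cases hlt : r < 0
  · have habs : pvAbsRef r = -r := by unfold pvAbsRef; simp [hlt]
    rw [pyResolveB] at h
    simp only [if_pos hlt, Option.isSome_map] at h
    rw [habs]
    exact aux (-r) (by omega) h (by rw [← habs]; exact hcon)
  · have habs : pvAbsRef r = r := by unfold pvAbsRef; simp [hlt]
    rw [habs]
    exact aux r hlt h (by rw [← habs]; exact hcon)

lemma pvStep_some_of_none (gm : PySem.Dict Int (String × List Int))
    (t : PySem.Dict Int String) (e : Int × String × List Int) (g : Int) (v : String)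
    (h : (pvStep gm t e).get? g = some v) (h0 : t.get? g = none) :
    e.1 = g ∧ ¬ (none ∈ e.2.2.map (pyResolveB gm t)) ∧
      v = pySmtNodeB e.2.1 ((e.2.2.map (pyResolveB gm t)).map (fun o => o.getD "")) := by
  unfold pvStep at h
  split at h
  · rw [h0] at h; simp at h
  · split at h
    · rw [h0] at h; simp at h
    · split at h
      · rw [h0] at h; simp at h
      · rename_i hnone
        rw [PySem.Dict.get?_insert] at h
        split at h
        · rename_i hk
          exact ⟨hk.symm, hnone, (Option.some_injective _ h).symm⟩
        · rw [h0] at h; simp at h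

lemma pvFoldList_char (gm : PySem.Dict Int (String × List Int))
    (es : List (Int × String × List Int)) :
    ∀ (t0 : PySem.Dict Int String) (g : Int) (v : String),
    (es.foldl (pvStep gm) t0).get? g = some v → t0.get? g = none →
    ∃ e ∈ es, e.1 = g ∧ ∃ t, t.get? g = none ∧ pvDictLe t (es.foldl (pvStep gm) t0) ∧
      ¬ (none ∈ e.2.2.map (pyResolveB gm t)) ∧
      v = pySmtNodeB e.2.1 ((e.2.2.map (pyResolveB gm t)).map (fun o => o.getD "")) := by
  induction es with
  | nil =>
    intro t0 g v h h0
    simp only [List.foldl_nil] at h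
    rw [h0] at h; simp at h
  | cons e es ih =>
    intro t0 g v h h0
    simp only [List.foldl_cons] at h ⊢
    cases h1 : (pvStep gm t0 e).get? g with
    | none =>
      obtain ⟨e', he', hg', t, ht⟩ := ih (pvStep gm t0 e) g v h h1
      exact ⟨e', List.mem_cons_of_mem _ he', hg', t, ht⟩
    | some w =>
      have hvw : v = w := by
        have := pvFold_mono gm es (pvStep gm t0 e) g w h1
        rw [this] at h
        exact (Option.some_injective _ h).symm
      obtain ⟨hg, hnone, hval⟩ := pvStep_some_of_none gm t0 e g w h1 h0
      refine ⟨e, List.mem_cons_self, hg, t0, h0, ?_, hnone, hvw ▸ hval⟩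
      exact pvDictLe_trans (pvStep_mono gm t0 e) (pvFold_mono gm es _)

lemma pvRounds_eq_flatten (gm : PySem.Dict Int (String × List Int))
    (K : List (Int × String × List Int)) (m : Nat) (t : PySem.Dict Int String) :
    pvRounds gm K m t = ((List.replicate m K).flatten).foldl (pvStep gm) t := by
  induction m generalizing t with
  | zero => rfl
  | succ n ih =>
    show pvRounds gm K n (pvRound gm K t) = _
    rw [ih (pvRound gm K t), List.replicate_succ, List.flatten_cons, List.foldl_append]
    rfl

lemma pvEntry_unique (K : List (Int × String × List Int)) (hnd : (pvKeys K).Nodup)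
    (e e' : Int × String × List Int) (he : e ∈ K) (he' : e' ∈ K) (h : e.1 = e'.1) :
    e = e' := by
  obtain ⟨i, hi, hei⟩ := List.getElem_of_mem he
  obtain ⟨j, hj, hej⟩ := List.getElem_of_mem he'
  have hik : i < (pvKeys K).length := by simpa [pvKeys] using hi
  have hjk : j < (pvKeys K).length := by simpa [pvKeys] using hj
  have hkey : (pvKeys K)[i] = (pvKeys K)[j] := by
    simp only [pvKeys, List.getElem_map, hei, hej]
    exact h
  have hij : i = j := hnd.getElem_inj_iff.mp hkey
  subst hij
  rw [← hei]
  exact hej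

lemma pvDoneStep_mono (K : List (Int × String × List Int)) (ck : List Int)
    (D D' : List Int) (h : ∀ x ∈ D, x ∈ D') :
    ∀ g ∈ pvDoneStep K ck D, g ∈ pvDoneStep K ck D' := by
  intro g hg
  unfold pvDoneStep at hg ⊢
  rw [List.mem_map] at hg ⊢
  obtain ⟨e, he, heg⟩ := hg
  rw [List.mem_filter] at he
  refine ⟨e, List.mem_filter.mpr ⟨he.1, ?_⟩, heg⟩
  rw [List.all_eq_true] at he ⊢
  intro r hr
  have hthis := he.2 r hr
  simp only [Bool.or_eq_true] at hthis ⊢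
  rcases hthis with (h2 | h2) | h2
  · exact Or.inl (Or.inl h2)
  · exact Or.inl (Or.inr h2)
  · right
    have hD : pvAbsRef r ∈ D := List.mem_of_elem_eq_true h2
    exact List.elem_eq_true_of_mem (h _ hD)

lemma pvDone_mono_succ (K : List (Int × String × List Int)) (ck : List Int) (k : Nat) :
    ∀ g ∈ pvDone K ck k, g ∈ pvDone K ck (k + 1) := by
  induction k with
  | zero => intro g hg; simp [pvDone] at hg
  | succ n ih =>
    show ∀ g ∈ pvDoneStep K ck (pvDone K ck n), g ∈ pvDoneStep K ck (pvDone K ck (n+1))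
    exact pvDoneStep_mono K ck _ _ ih

lemma pvDone_mono (K : List (Int × String × List Int)) (ck : List Int) (k k' : Nat)
    (h : k ≤ k') : ∀ g ∈ pvDone K ck k, g ∈ pvDone K ck k' := by
  induction k' with
  | zero =>
    have : k = 0 := by omega
    subst this
    intro g hg; exact hg
  | succ n ih =>
    rcases Nat.lt_or_ge k (n+1) with hlt | hge
    · intro g hg
      exact pvDone_mono_succ K ck n g (ih (by omega) g hg)
    · have : k = n + 1 := by omega
      subst this
      intro g hg; exact hg

lemma pvDone_elim (K : List (Int × String × List Int)) (ck : List Int) (k : Nat) (g : Int)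
    (h : g ∈ pvDone K ck (k + 1)) :
    ∃ e ∈ K, e.1 = g ∧ ∀ r ∈ e.2.2,
      (pvKeys K).contains (pvAbsRef r) = false ∨ pvAbsRef r ∈ ck ∨
        pvAbsRef r ∈ pvDone K ck k := by
  have h' : g ∈ pvDoneStep K ck (pvDone K ck k) := h
  unfold pvDoneStep at h'
  rw [List.mem_map] at h'
  obtain ⟨e, he, heg⟩ := h'
  rw [List.mem_filter] at he
  refine ⟨e, he.1, heg, ?_⟩
  intro r hr
  have hthis := (List.all_eq_true.mp he.2) r hr
  simp only [Bool.or_eq_true] at hthis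
  rcases hthis with (h2 | h2) | h2
  · left
    cases hc : (pvKeys K).contains (pvAbsRef r)
    · rfl
    · exfalso
      have hb : (!(pvKeys K).contains (pvAbsRef r)) = true := h2
      rw [hc] at hb
      exact Bool.noConfusion hb
  · right; left; exact List.mem_of_elem_eq_true h2
  · right; right; exact List.mem_of_elem_eq_true h2

lemma pvDone_min (K : List (Int × String × List Int)) (ck : List Int) (k : Nat) (g : Int)
    (h : g ∈ pvDone K ck k) :
    ∃ m, m < k ∧ g ∉ pvDone K ck m ∧ g ∈ pvDone K ck (m + 1) := by
  induction k with
  | zero => simp [pvDone] at h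
  | succ n ih =>
    by_cases hn : g ∈ pvDone K ck n
    · obtain ⟨m, hm, h1, h2⟩ := ih hn
      exact ⟨m, by omega, h1, h2⟩
    · exact ⟨n, by omega, hn, h⟩

-- the two hypotheses the induction runs on, extracted from Pre_ in the final theorem
def pvHChild (K : List (Int × String × List Int)) (cache : List (Int × String))
    (R : List Int) : Prop :=
  ∀ e ∈ K, e.1 ∈ R → e.1 ∉ pvCK cache →
    ∀ r ∈ e.2.2, (pvKeys K).contains (pvAbsRef r) = true → pvAbsRef r ∈ R

def pvHType (K : List (Int × String × List Int)) (cache : List (Int × String))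
    (R : List Int) : Prop :=
  ∀ e ∈ K, e.1 ∈ R → e.1 ∉ pvCK cache →
    e.2.1 = "and" ∨ e.2.1 = "or" ∨ e.2.1 = "xor" ∨ (e.2.1 = "ite" ∧ e.2.2.length = 3)

lemma pvGuard_of_type (e : Int × String × List Int)
    (hty : e.2.1 = "and" ∨ e.2.1 = "or" ∨ e.2.1 = "xor" ∨ (e.2.1 = "ite" ∧ e.2.2.length = 3)) :
    ¬ (¬ (e.2.1 = "and" ∨ e.2.1 = "or" ∨ e.2.1 = "xor" ∨ e.2.1 = "ite")
        ∨ (e.2.1 = "ite" ∧ e.2.2.length ≠ 3)) := by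
  rcases hty with h | h | h | ⟨h, hl⟩ <;> simp [h]
  omega

lemma pvCacheGet_isSome (cache : List (Int × String)) (g : Int) (h : g ∈ pvCK cache) :
    ((PySem.Dict.mk cache : PySem.Dict Int String).get? g).isSome := by
  cases hx : (PySem.Dict.mk cache : PySem.Dict Int String).get? g with
  | some v => rfl
  | none =>
    rw [PySem.Dict.get?_eq_none_iff_not_mem_keys] at hx
    exact absurd h hx

lemma pvRound_present (gm : PySem.Dict Int (String × List Int))
    (K : List (Int × String × List Int)) (t : PySem.Dict Int String)
    (e : Int × String × List Int) (j : Nat) (hj : j < K.length) (hje : K[j] = e)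
    (hguard : ¬ (¬ (e.2.1 = "and" ∨ e.2.1 = "or" ∨ e.2.1 = "xor" ∨ e.2.1 = "ite")
        ∨ (e.2.1 = "ite" ∧ e.2.2.length ≠ 3)))
    (hres : ∀ r ∈ e.2.2, (pyResolveB gm t r).isSome) :
    ((pvRound gm K t).get? e.1).isSome := by
  have hsplit : K.take j ++ K[j] :: K.drop (j+1) = K := by
    rw [← List.drop_eq_getElem_cons hj, List.take_append_drop]
  have hT : pvRound gm K t = (K.drop (j+1)).foldl (pvStep gm)
      (pvStep gm ((K.take j).foldl (pvStep gm) t) K[j]) := by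
    unfold pvRound
    conv_lhs => rw [← hsplit]
    rw [List.foldl_append, List.foldl_cons]
  set t' := (K.take j).foldl (pvStep gm) t with ht'
  have hmono : pvDictLe t t' := pvFold_mono gm _ t
  have hres' : ∀ r ∈ e.2.2, (pyResolveB gm t' r).isSome := by
    intro r hr
    have h1 := hres r hr
    have := pvResolveB_congr gm t t' hmono r (pvResolveB_isSome_inv gm t r h1)
    rw [← this]
    exact h1
  rw [hT, hje]
  by_cases hc : t'.contains e.1 = true
  · have : (t'.get? e.1).isSome := by rwa [PySem.Dict.contains_eq_isSome_get?] at hc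
    obtain ⟨v, hv⟩ := Option.isSome_iff_exists.mp this
    have hstep := pvStep_mono gm t' e e.1 v hv
    have := pvFold_mono gm (K.drop (j+1)) (pvStep gm t' e) e.1 v hstep
    rw [this]; rfl
  · have hcf : t'.contains e.1 = false := by cases h : t'.contains e.1; rfl; exact absurd h hc
    have hnone : ¬ (none ∈ e.2.2.map (pyResolveB gm t')) := by
      rw [List.mem_map]
      rintro ⟨r, hr, hres0⟩
      have := hres' r hr
      rw [hres0] at this; simp at this
    rw [pvStep_insert gm t' e hcf hguard hnone]
    obtain ⟨v, hv⟩ : ∃ v, ((t'.insert e.1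
        (pySmtNodeB e.2.1 ((e.2.2.map (pyResolveB gm t')).map (fun o => o.getD "")))).get? e.1)
        = some v := ⟨_, PySem.Dict.get?_insert_self _ _ _⟩
    have := pvFold_mono gm (K.drop (j+1)) _ e.1 v hv
    rw [this]; rfl

lemma pvPresent (K : List (Int × String × List Int)) (cache : List (Int × String))
    (R : List Int) (hnd : (pvKeys K).Nodup)
    (hchild : pvHChild K cache R) (htype : pvHType K cache R) :
    ∀ k, ∀ e ∈ K, e.1 ∈ pvDone K (pvCK cache) k → e.1 ∈ R → e.1 ∉ pvCK cache →
    ((pvRounds (PySem.Dict.mk K) K k (PySem.Dict.mk cache)).get? e.1).isSome := by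
  intro k
  induction k with
  | zero => intro e he hdone; simp [pvDone] at hdone
  | succ n ih =>
    intro e he hdone hR hck
    obtain ⟨e', he', heg, hcond⟩ := pvDone_elim K (pvCK cache) n e.1 hdone
    have hee : e' = e := pvEntry_unique K hnd e' e he' he heg
    subst hee
    rw [pvRounds_succ_end]
    obtain ⟨j, hj, hje⟩ := List.getElem_of_mem he'
    apply pvRound_present (PySem.Dict.mk K) K _ e' j hj hje
      (pvGuard_of_type e' (htype e' he' hR hck))
    intro r hr
    apply pvResolveB_isSome
    intro hcon
    rcases hcond r hr with hcf | hcase | hcase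
    · exfalso
      have hmemk : pvAbsRef r ∈ pvKeys K := (pvDictContains_iff K _).mp hcon
      have hct : (pvKeys K).contains (pvAbsRef r) = true := List.elem_eq_true_of_mem hmemk
      rw [hct] at hcf; exact Bool.noConfusion hcf
    · obtain ⟨v, hv⟩ := Option.isSome_iff_exists.mp (pvCacheGet_isSome cache _ hcase)
      have := pvRounds_le (PySem.Dict.mk K) K n (PySem.Dict.mk cache) _ v hv
      rw [this]; rfl
    · by_cases hcck : pvAbsRef r ∈ pvCK cache
      · obtain ⟨v, hv⟩ := Option.isSome_iff_exists.mp (pvCacheGet_isSome cache _ hcck)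
        have := pvRounds_le (PySem.Dict.mk K) K n (PySem.Dict.mk cache) _ v hv
        rw [this]; rfl
      · have hmem : pvAbsRef r ∈ pvKeys K := (pvDictContains_iff K _).mp hcon
        obtain ⟨ec, hec, hecg⟩ : ∃ ec ∈ K, ec.1 = pvAbsRef r := by
          rw [pvKeys, List.mem_map] at hmem
          obtain ⟨ec, h1, h2⟩ := hmem
          exact ⟨ec, h1, h2⟩
        have hcR : pvAbsRef r ∈ R :=
          hchild e' he' hR hck r hr (List.elem_eq_true_of_mem hmem)
        have := ih ec hec (by rw [hecg]; exact hcase) (by rw [hecg]; exact hcR)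
          (by rw [hecg]; exact hcck)
        rw [hecg] at this
        exact this

lemma pvBuild_char (K : List (Int × String × List Int)) (cache : List (Int × String))
    (hnd : (pvKeys K).Nodup) (e : Int × String × List Int) (he : e ∈ K)
    (hck : e.1 ∉ pvCK cache) (v : String) (hv : (pvT K cache).get? e.1 = some v) :
    v = pySmtNodeB e.2.1
      (e.2.2.map (fun r => (pyResolveB (PySem.Dict.mk K) (pvT K cache) r).getD "")) := by
  have h0 : (PySem.Dict.mk cache : PySem.Dict Int String).get? e.1 = none :=
    (PySem.Dict.get?_eq_none_iff_not_mem_keys _ _).mpr hck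
  have hflat : pvT K cache
      = ((List.replicate (K.length + 1) K).flatten).foldl (pvStep (PySem.Dict.mk K))
          (PySem.Dict.mk cache) := pvRounds_eq_flatten _ _ _ _
  rw [hflat] at hv
  obtain ⟨e', he', heg, t, ht0, htle, hnone, hval⟩ :=
    pvFoldList_char (PySem.Dict.mk K) _ (PySem.Dict.mk cache) e.1 v hv h0
  have heK : e' ∈ K := by
    rw [List.mem_flatten] at he'
    obtain ⟨l, hl, hel⟩ := he'
    rw [List.eq_of_mem_replicate hl] at hel
    exact hel
  have hee : e' = e := pvEntry_unique K hnd e' e heK he heg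
  subst hee
  have htleT : pvDictLe t (pvT K cache) := by rw [hflat]; exact htle
  have hcongr : ∀ r ∈ e'.2.2, pyResolveB (PySem.Dict.mk K) t r
      = pyResolveB (PySem.Dict.mk K) (pvT K cache) r := by
    intro r hr
    apply pvResolveB_congr _ _ _ htleT
    apply pvResolveB_isSome_inv
    cases hx : pyResolveB (PySem.Dict.mk K) t r with
    | some s => rfl
    | none => exact absurd (List.mem_map.mpr ⟨r, hr, hx⟩) hnone
  rw [hval, List.map_map]
  congr 1
  apply List.map_congr_left
  intro r hr
  simp only [Function.comp_apply, hcongr r hr]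

lemma pvXor_eq (parts : List String) :
    pyXorExprA parts =
      (match parts with
       | [] => "false"
       | p :: rest => rest.foldl (fun acc q => "(xor " ++ acc ++ " " ++ q ++ ")") p) := by
  rcases parts with _ | ⟨p, _ | ⟨q, _ | ⟨s, rest⟩⟩⟩ <;>
    simp [pyXorExprA, List.foldl]

-- A's inline expression construction equals B's _smt_node on supported gate types
lemma pvSmtNode_eq (gty : String) (parts : List String)
    (hty : gty = "and" ∨ gty = "or" ∨ gty = "xor" ∨ (gty = "ite" ∧ parts.length = 3)) :
    (if gty = "and" then
        (if parts.isEmpty then "true" else "(and " ++ PySem.Str.join " " parts ++ ")")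
      else if gty = "or" then
        (if parts.isEmpty then "false" else "(or " ++ PySem.Str.join " " parts ++ ")")
      else if gty = "xor" then pyXorExprA parts
      else if gty = "ite" then
        (if parts.length = 3 then
          "(ite " ++ parts[0]! ++ " " ++ parts[1]! ++ " " ++ parts[2]! ++ ")"
        else "")
      else "") = pySmtNodeB gty parts := by
  rcases hty with h | h | h | ⟨h, hlen⟩
  · subst h; simp [pySmtNodeB]
  · subst h; simp [pySmtNodeB]
  · subst h; simp [pySmtNodeB, pvXor_eq]
  · subst h; simp [pySmtNodeB, hlen]

def pvGateOkP (K : List (Int × String × List Int)) (cache : List (Int × String))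
    (R : List Int) (k : Nat) : Prop :=
  k ≤ K.length →
  ∀ e ∈ K, e.1 ∈ pvDone K (pvCK cache) k → e.1 ∈ R → e.1 ∉ pvCK cache →
  ∀ (fuel : Nat) (c : PySem.Dict Int String) (vis : PySem.Set Int),
    2 * k + 2 ≤ fuel → pvGood K cache c →
    (∀ x ∈ vis, x ∈ R → x ∉ pvCK cache → x ∉ pvDone K (pvCK cache) k) →
    ∃ v c', (pvT K cache).get? e.1 = some v ∧
      pyGateExprA fuel e.1 (PySem.Dict.mk K) c vis = (v, c') ∧ pvGood K cache c'

lemma pvRef_nonneg (K : List (Int × String × List Int)) (cache : List (Int × String))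
    (R : List Int) (i : Nat) (hi : i ≤ K.length) (hG : pvGateOkP K cache R i)
    (r : Int) (hr : 0 ≤ r) (fuel : Nat) (c : PySem.Dict Int String) (vis : PySem.Set Int)
    (hfuel : 2 * i + 3 ≤ fuel) (hc : pvGood K cache c)
    (hin : (PySem.Dict.mk K : PySem.Dict Int (String × List Int)).contains r = true →
      r ∈ R ∧ (r ∉ pvCK cache → r ∈ pvDone K (pvCK cache) i))
    (hvis : ∀ x ∈ vis, x ∈ R → x ∉ pvCK cache → x ∉ pvDone K (pvCK cache) i) :
    ∃ s c', pyResolveB (PySem.Dict.mk K) (pvT K cache) r = some s ∧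
      pyRefExprA fuel r (PySem.Dict.mk K) c vis = (s, c') ∧ pvGood K cache c' := by
  obtain ⟨f, rfl⟩ : ∃ f, fuel = f + 1 := ⟨fuel - 1, by omega⟩
  have hr' : ¬ r < 0 := by omega
  by_cases hcon : (PySem.Dict.mk K : PySem.Dict Int (String × List Int)).contains r = true
  · obtain ⟨hmemR, hdonef⟩ := hin hcon
    by_cases hcck : r ∈ pvCK cache
    · obtain ⟨v0, hv0⟩ := Option.isSome_iff_exists.mp (pvCacheGet_isSome cache r hcck)
      have hcs := hc.1 _ _ hv0
      have hT := hc.2 _ _ hcs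
      refine ⟨v0, c, ?_, ?_, hc⟩
      · rw [pyResolveB]
        simp [hr', hcon, hT]
      · simp only [pyRefExprA, if_neg hr', hcon, if_true]
        simp only [pyGateExprA, hcs]
    · have hmem : r ∈ pvKeys K := (pvDictContains_iff K _).mp hcon
      obtain ⟨e, he, heg⟩ : ∃ e ∈ K, e.1 = r := by
        rw [pvKeys, List.mem_map] at hmem
        obtain ⟨e, h1, h2⟩ := hmem
        exact ⟨e, h1, h2⟩
      obtain ⟨v, c', hTv, hgeq, hgood'⟩ :=
        hG hi e he (by rw [heg]; exact hdonef hcck) (by rw [heg]; exact hmemR)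
          (by rw [heg]; exact hcck) f c vis (by omega) hc hvis
      rw [heg] at hgeq hTv
      refine ⟨v, c', ?_, ?_, hgood'⟩
      · rw [pyResolveB]
        simp [hr', hcon, hTv]
      · simp only [pyRefExprA, if_neg hr', hcon, if_true]
        rw [hgeq]
  · have hcon' : (PySem.Dict.mk K : PySem.Dict Int (String × List Int)).contains r = false := by
      cases h : (PySem.Dict.mk K : PySem.Dict Int (String × List Int)).contains r
      · rfl
      · exact absurd h hcon
    refine ⟨"q" ++ PySem.Int.toStr r, c, ?_, ?_, hc⟩
    · rw [pyResolveB]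
      simp [hr', hcon']
    · simp only [pyRefExprA, if_neg hr', hcon']
      simp

lemma pvRef_any (K : List (Int × String × List Int)) (cache : List (Int × String))
    (R : List Int) (i : Nat) (hi : i ≤ K.length) (hG : pvGateOkP K cache R i)
    (r : Int) (fuel : Nat) (c : PySem.Dict Int String) (vis : PySem.Set Int)
    (hfuel : 2 * i + 4 ≤ fuel) (hc : pvGood K cache c)
    (hin : (PySem.Dict.mk K : PySem.Dict Int (String × List Int)).contains (pvAbsRef r) = true →
      pvAbsRef r ∈ R ∧ (pvAbsRef r ∉ pvCK cache → pvAbsRef r ∈ pvDone K (pvCK cache) i))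
    (hvis : ∀ x ∈ vis, x ∈ R → x ∉ pvCK cache → x ∉ pvDone K (pvCK cache) i) :
    ∃ s c', pyResolveB (PySem.Dict.mk K) (pvT K cache) r = some s ∧
      pyRefExprA fuel r (PySem.Dict.mk K) c vis = (s, c') ∧ pvGood K cache c' := by
  by_cases hlt : r < 0
  · obtain ⟨f, rfl⟩ : ∃ f, fuel = f + 1 := ⟨fuel - 1, by omega⟩
    have habs : pvAbsRef r = -r := by unfold pvAbsRef; simp [hlt]
    obtain ⟨s, c', hsome, heq, hgood'⟩ := pvRef_nonneg K cache R i hi hG (-r) (by omega) f c vis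
      (by omega) hc (by rw [habs] at hin; exact hin) hvis
    refine ⟨"(not " ++ s ++ ")", c', ?_, ?_, hgood'⟩
    · rw [pyResolveB]
      simp only [if_pos hlt]
      rw [hsome]
      rfl
    · simp only [pyRefExprA, if_pos hlt]
      rw [heq]
  · have habs : pvAbsRef r = r := by unfold pvAbsRef; simp [hlt]
    exact pvRef_nonneg K cache R i hi hG r (by omega) fuel c vis (by omega) hc
      (by rw [← habs]; exact hin) hvis

lemma pvFold_children (K : List (Int × String × List Int)) (cache : List (Int × String))
    (R : List Int) (i : Nat) (hi : i ≤ K.length) (hG : pvGateOkP K cache R i)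
    (fuel : Nat) (hfuel : 2 * i + 4 ≤ fuel)
    (vis : PySem.Set Int)
    (hvis : ∀ x ∈ vis, x ∈ R → x ∉ pvCK cache → x ∉ pvDone K (pvCK cache) i) :
    ∀ (rs : List Int),
      (∀ r ∈ rs, (PySem.Dict.mk K : PySem.Dict Int (String × List Int)).contains (pvAbsRef r) = true →
        pvAbsRef r ∈ R ∧ (pvAbsRef r ∉ pvCK cache → pvAbsRef r ∈ pvDone K (pvCK cache) i)) →
      ∀ (acc : List String) (c : PySem.Dict Int String), pvGood K cache c →
      ∃ c', rs.foldl (fun (a : List String × PySem.Dict Int String) r =>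
              let p := pyRefExprA fuel r (PySem.Dict.mk K) a.2 vis
              (a.1 ++ [p.1], p.2)) (acc, c)
          = (acc ++ rs.map (fun r => (pyResolveB (PySem.Dict.mk K) (pvT K cache) r).getD ""), c')
        ∧ pvGood K cache c' := by
  intro rs
  induction rs with
  | nil =>
    intro _ acc c hc
    exact ⟨c, by simp, hc⟩
  | cons r rs ih =>
    intro h acc c hc
    obtain ⟨s, c1, hsome, heq, hg1⟩ := pvRef_any K cache R i hi hG r fuel c vis hfuel hc
      (h r (by simp)) hvis
    simp only [List.foldl_cons]
    obtain ⟨c', heq2, hg2⟩ := ih (fun r' hr' => h r' (by simp [hr']))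
      (acc ++ [s]) c1 hg1
    refine ⟨c', ?_, hg2⟩
    dsimp only
    rw [heq]
    dsimp only
    rw [heq2]
    simp [hsome]

lemma pvGate_main (K : List (Int × String × List Int)) (cache : List (Int × String))
    (R : List Int) (hnd : (pvKeys K).Nodup)
    (hchild : pvHChild K cache R) (htype : pvHType K cache R) :
    ∀ k, pvGateOkP K cache R k := by
  intro k
  induction k using Nat.strong_induction_on with
  | _ k IH =>
  intro hk e he hdone hR hck fuel c vis hfuel hgood hvis
  by_cases hcache : ∃ s, c.get? e.1 = some s
  · obtain ⟨s, hs⟩ := hcache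
    refine ⟨s, c, hgood.2 _ _ hs, ?_, hgood⟩
    simp only [pyGateExprA, hs]
  · have hnone : c.get? e.1 = none := by
      cases hx : c.get? e.1 with
      | none => rfl
      | some s => exact absurd ⟨s, hx⟩ hcache
    have hnotvis : PySem.Set.contains vis e.1 = false := by
      cases hb : PySem.Set.contains vis e.1 with
      | false => rfl
      | true =>
        exfalso
        have : e.1 ∈ vis := by
          simpa [PySem.Set.contains] using hb
        exact hvis _ this hR hck hdone
    have hgm : (PySem.Dict.mk K : PySem.Dict Int (String × List Int)).get? e.1
        = some e.2 := by
      apply PySem.Dict.get?_of_mem_items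
      · show (e.1, e.2) ∈ K
        exact he
      · exact hnd
    obtain ⟨m, hmk, hmnot, hmin⟩ := pvDone_min K (pvCK cache) k e.1 hdone
    obtain ⟨e', he', heg, hcond⟩ := pvDone_elim K (pvCK cache) m e.1 hmin
    have hee : e' = e := pvEntry_unique K hnd e' e he' he heg
    subst hee
    have hchildj : ∀ r ∈ e'.2.2,
        (PySem.Dict.mk K : PySem.Dict Int (String × List Int)).contains (pvAbsRef r) = true →
        pvAbsRef r ∈ R ∧ (pvAbsRef r ∉ pvCK cache → pvAbsRef r ∈ pvDone K (pvCK cache) m) := by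
      intro r hr hcont
      have hmem : pvAbsRef r ∈ pvKeys K := (pvDictContains_iff K _).mp hcont
      refine ⟨hchild e' he' hR hck r hr (List.elem_eq_true_of_mem hmem), ?_⟩
      intro hrck
      rcases hcond r hr with h1 | h1 | h1
      · exfalso
        have : (pvKeys K).contains (pvAbsRef r) = true := List.elem_eq_true_of_mem hmem
        rw [this] at h1; exact Bool.noConfusion h1
      · exact absurd h1 hrck
      · exact h1
    have hvisj : ∀ x ∈ PySem.Set.add vis e'.1, x ∈ R → x ∉ pvCK cache →
        x ∉ pvDone K (pvCK cache) m := by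
      intro x hx hxR hxck
      rcases (PySem.Set.mem_add vis e'.1 x).mp hx with hx' | hx'
      · intro hmem
        exact hvis x hx' hxR hxck (pvDone_mono K (pvCK cache) m k (by omega) x hmem)
      · subst hx'
        exact hmnot
    obtain ⟨c', hfold, hgood'⟩ := pvFold_children K cache R m (by omega)
      (IH m (by omega)) fuel (by omega) (PySem.Set.add vis e'.1) hvisj
      e'.2.2 hchildj [] c hgood
    have hty := htype e' he' hR hck
    have htyparts : e'.2.1 = "and" ∨ e'.2.1 = "or" ∨ e'.2.1 = "xor" ∨
        (e'.2.1 = "ite" ∧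
          (e'.2.2.map (fun r => (pyResolveB (PySem.Dict.mk K) (pvT K cache) r).getD "")).length = 3) := by
      rcases hty with h | h | h | ⟨h, hl⟩
      · exact Or.inl h
      · exact Or.inr (Or.inl h)
      · exact Or.inr (Or.inr (Or.inl h))
      · exact Or.inr (Or.inr (Or.inr ⟨h, by simpa using hl⟩))
    have hpres : ((pvT K cache).get? e'.1).isSome := by
      have h1 := pvPresent K cache R hnd hchild htype (m+1) e' he' hmin hR hck
      obtain ⟨v0, hv0⟩ := Option.isSome_iff_exists.mp h1
      have hmo := pvRounds_mono (PySem.Dict.mk K) K (m+1) (K.length+1) (by omega)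
        (PySem.Dict.mk cache) _ v0 hv0
      show ((pvRounds (PySem.Dict.mk K) K (K.length+1) (PySem.Dict.mk cache)).get? e'.1).isSome
      rw [hmo]; rfl
    obtain ⟨v0, hv0⟩ := Option.isSome_iff_exists.mp hpres
    have hchar := pvBuild_char K cache hnd e' he' hck v0 hv0
    refine ⟨v0, c'.insert e'.1 v0, hv0, ?_, ?_⟩
    · simp only [pyGateExprA, hnone, hnotvis, hgm]
      rw [hfold]
      simp only [List.nil_append]
      rw [pvSmtNode_eq e'.2.1 _ htyparts, ← hchar]
      simp
    · constructor
      · intro k0 v hv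
        have hk0 : k0 ≠ e'.1 := by
          intro hk0
          subst hk0
          have : (PySem.Dict.mk cache : PySem.Dict Int String).get? e'.1 = none :=
            (PySem.Dict.get?_eq_none_iff_not_mem_keys _ _).mpr hck
          rw [this] at hv
          simp at hv
        rw [PySem.Dict.get?_insert_of_ne _ _ hk0]
        exact hgood'.1 k0 v hv
      · intro g v hgv
        by_cases hg : g = e'.1
        · subst hg
          rw [PySem.Dict.get?_insert_self] at hgv
          rw [hv0, ← hgv]
        · rw [PySem.Dict.get?_insert_of_ne _ _ hg] at hgv
          exact hgood'.2 g v hgv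

-- reach-set facts
lemma pvReachStep_mem (K : List (Int × String × List Int)) (cache : List (Int × String))
    (R : List Int) (x : Int) (hx : x ∈ R) : x ∈ pvReachStep K cache R := by
  unfold pvReachStep
  rw [List.mem_dedup]
  exact List.mem_append_left _ hx

lemma pvReach_start (ref : Int) (K : List (Int × String × List Int))
    (cache : List (Int × String)) : pvAbsRef ref ∈ pvReach ref K cache := by
  unfold pvReach
  have aux : ∀ (n : Nat) (R : List Int) (x : Int), x ∈ R →
      x ∈ (pvReachStep K cache)^[n] R := by
    intro n
    induction n with
    | zero => intro R x hx; simpa using hx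
    | succ m ih =>
      intro R x hx
      rw [Function.iterate_succ_apply]
      exact ih _ _ (pvReachStep_mem K cache R x hx)
  exact aux _ _ _ (by simp)

lemma pvReach_closed (ref : Int) (K : List (Int × String × List Int))
    (cache : List (Int × String))
    (hfix : pvReachStep K cache (pvReach ref K cache) = pvReach ref K cache)
    (g : Int) (hg : g ∈ pvReach ref K cache) (x : Int)
    (hx : x ∈ pvChildExp K cache g) : x ∈ pvReach ref K cache := by
  rw [← hfix]
  unfold pvReachStep
  rw [List.mem_dedup]
  apply List.mem_append_right
  rw [List.mem_flatMap]
  exact ⟨g, hg, hx⟩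

-- ===== VERDICT (by name: the statement is the Claim_ definition above) =====
theorem reference_expression_py_spec : Claim_equal_reference_expression_py := by
  intro ref K cache visiting _ hpre
  obtain ⟨hnd, _, hfix, hdonePre, htypesPre, hvisPre⟩ := hpre
  unfold Spec_reference_expression_py reference_expression_py reference_expression_py_alt
  have hchild : pvHChild K cache (pvReach ref K cache) := by
    intro e he hR hck r hr hcont
    apply pvReach_closed ref K cache hfix e.1 hR
    unfold pvChildExp
    have hckc : (pvCK cache).contains e.1 = false := by
      cases hcc : (pvCK cache).contains e.1
      · rfl
      · exact absurd (List.mem_of_elem_eq_true hcc) hck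
    rw [hckc]
    have hgm : (PySem.Dict.mk K : PySem.Dict Int (String × List Int)).get? e.1
        = some e.2 := by
      apply PySem.Dict.get?_of_mem_items
      · show (e.1, e.2) ∈ K
        exact he
      · exact hnd
    rw [hgm]
    simp only [Bool.false_eq_true, if_false]
    rw [List.mem_filter]
    refine ⟨List.mem_map.mpr ⟨r, hr, rfl⟩, hcont⟩
  have htype : pvHType K cache (pvReach ref K cache) := htypesPre
  have hG : pvGateOkP K cache (pvReach ref K cache) K.length :=
    pvGate_main K cache (pvReach ref K cache) hnd hchild htype K.length
  have hgood : pvGood K cache (PySem.Dict.mk cache) := by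
    refine ⟨fun k v h => h, fun g v h => ?_⟩
    exact pvRounds_le (PySem.Dict.mk K) K (K.length+1) (PySem.Dict.mk cache) g v h
  have hin : (PySem.Dict.mk K : PySem.Dict Int (String × List Int)).contains (pvAbsRef ref) = true →
      pvAbsRef ref ∈ pvReach ref K cache ∧
        (pvAbsRef ref ∉ pvCK cache → pvAbsRef ref ∈ pvDone K (pvCK cache) K.length) := by
    intro hcont
    have hmem : pvAbsRef ref ∈ pvKeys K := (pvDictContains_iff K _).mp hcont
    obtain ⟨e, he, heg⟩ : ∃ e ∈ K, e.1 = pvAbsRef ref := by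
      rw [pvKeys, List.mem_map] at hmem
      obtain ⟨e, h1, h2⟩ := hmem
      exact ⟨e, h1, h2⟩
    refine ⟨pvReach_start ref K cache, fun hck => ?_⟩
    have := hdonePre e he (by rw [heg]; exact pvReach_start ref K cache)
      (by rw [heg]; exact hck)
    rw [heg] at this
    exact this
  have hvis' : ∀ x ∈ visiting.getD [], x ∈ pvReach ref K cache → x ∉ pvCK cache →
      x ∉ pvDone K (pvCK cache) K.length := by
    intro x hx hxR hxck hxd
    obtain ⟨m, _, _, hm1⟩ := pvDone_min K (pvCK cache) _ x hxd
    obtain ⟨e, he, heg, _⟩ := pvDone_elim K (pvCK cache) m x hm1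
    have := hvisPre e he (by rw [heg]; exact hxR) (by rw [heg]; exact hxck)
    rw [heg] at this
    exact this hx
  obtain ⟨s, c', hsome, heq, _⟩ := pvRef_any K cache (pvReach ref K cache) K.length
    (le_refl _) hG ref (2 * K.length + 4) (PySem.Dict.mk cache) (visiting.getD [])
    (by omega) hgood hin hvis'
  rw [heq]
  show s = (pyResolveB (PySem.Dict.mk K)
    (pyBuildTableB (PySem.Dict.mk K) K (K.length + 1) (PySem.Dict.mk cache)) ref).getD ""
  rw [pvBuild_eq]
  rw [show pvRounds (PySem.Dict.mk K) K (K.length+1) (PySem.Dict.mk cache) = pvT K cache from rfl] at *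
  rw [hsome]
  rfl
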